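-- pv_equiv track=rewrite | github.com/lazynerd-007/lpv1 | backend/app/middleware/analytics_middleware.py | _match_endpoint_pattern
-- ===== SOURCE A (Python) =====
-- def _match_endpoint_pattern(endpoint: str, pattern: str) -> bool:
--     """Check if endpoint matches pattern (handling path parameters)"""
--     endpoint_parts = endpoint.split('/')
--     pattern_parts = pattern.split('/')
--
--     if len(endpoint_parts) != len(pattern_parts):
--         return False
--
--     for ep, pp in zip(endpoint_parts, pattern_parts):
--         if pp.startswith('{') and pp.endswith('}'):
--             # This is a path parameter, skip comparison
--             continue
--         elif ep != pp:
--             return False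
--
--     return True
-- ===== SOURCE B (Python) =====
-- def _match_endpoint_pattern(endpoint: str, pattern: str) -> bool:
--     """Segment-at-a-time recursion: peel one '/'-segment off each string with
--     find/slice instead of materialising split lists and zipping them."""
--     ei = endpoint.find('/')
--     pi = pattern.find('/')
--     eseg = endpoint if ei < 0 else endpoint[:ei]
--     pseg = pattern if pi < 0 else pattern[:pi]
--     if not (pseg.startswith('{') and pseg.endswith('}')) and eseg != pseg:
--         return False
--     if ei < 0 and pi < 0:
--         return True
--     if ei < 0 or pi < 0:
--         return False
--     return _match_endpoint_pattern(endpoint[ei + 1:], pattern[pi + 1:])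
-- ===== Notes on version B (the rewrite author's own statement) =====
-- stated objective: alternative
-- what changed: Replaces split-both-strings + length check + zip loop by a direct recursion that peels one '/'-segment off each string per step with find/slice, never building the segment lists (the length check disappears into the recursion's base cases).
import Mathlib
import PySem

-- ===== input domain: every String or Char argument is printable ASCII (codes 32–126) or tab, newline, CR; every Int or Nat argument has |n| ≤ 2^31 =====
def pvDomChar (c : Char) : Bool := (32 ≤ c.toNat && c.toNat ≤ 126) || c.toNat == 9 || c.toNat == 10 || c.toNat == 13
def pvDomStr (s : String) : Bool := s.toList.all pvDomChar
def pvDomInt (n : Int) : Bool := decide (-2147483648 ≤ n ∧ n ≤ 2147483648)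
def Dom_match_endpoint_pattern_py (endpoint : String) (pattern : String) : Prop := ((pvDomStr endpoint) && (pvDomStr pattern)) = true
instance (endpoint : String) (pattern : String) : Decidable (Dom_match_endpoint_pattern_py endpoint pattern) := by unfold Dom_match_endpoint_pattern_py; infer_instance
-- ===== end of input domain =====

-- B replaces split-both-strings + length check + zip loop by a recursion peeling one
-- '/'-segment off each string per step with find/slice (alternative decomposition, same cost).

-- ===== PORT A =====
-- the 'for ep, pp in zip(...)' loop with continue / early return
def matchGoA : List (List Char × List Char) → Bool
  | [] => true
  | (ep, pp) :: rest =>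
    if PySem.Chars.startswith pp ['{'] && PySem.Chars.endswith pp ['}'] then
      matchGoA rest
    else if ep ≠ pp then false
    else matchGoA rest

def match_endpoint_pattern_py (endpoint : String) (pattern : String) : Bool :=
  -- s.split('/') with the non-empty literal separator '/' is PySem.Chars.splitOn on the char list
  let endpoint_parts := PySem.Chars.splitOn endpoint.toList ['/']
  let pattern_parts := PySem.Chars.splitOn pattern.toList ['/']
  if endpoint_parts.length ≠ pattern_parts.length then false
  else matchGoA (endpoint_parts.zip pattern_parts)

-- ===== PORT B =====
def altGo (e p : List Char) : Bool :=
  let ei := PySem.Chars.find e ['/']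
  let pi := PySem.Chars.find p ['/']
  let eseg := if ei < 0 then e else PySem.List.slice e none (some ei)
  let pseg := if pi < 0 then p else PySem.List.slice p none (some pi)
  if (!(PySem.Chars.startswith pseg ['{'] && PySem.Chars.endswith pseg ['}'])) && eseg ≠ pseg then
    false
  else if ei < 0 ∧ pi < 0 then true
  else if h : ei < 0 ∨ pi < 0 then false
  else altGo (PySem.List.slice e (some (ei + 1)) none) (PySem.List.slice p (some (pi + 1)) none)
termination_by e.length
decreasing_by
  have hei : 0 ≤ PySem.Chars.find e ['/'] := by omega
  have hinf : ['/'] <:+: e := (PySem.Chars.find_nonneg_iff e ['/']).mp hei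
  have hlen : 1 ≤ e.length := hinf.sublist.length_le
  rw [PySem.List.slice_from _ (by omega : (0:Int) ≤ PySem.Chars.find e ['/'] + 1)]
  have : 1 ≤ (PySem.Chars.find e ['/'] + 1).toNat := by omega
  simp only [List.length_drop]
  omega

def match_endpoint_pattern_py_alt (endpoint : String) (pattern : String) : Bool :=
  altGo endpoint.toList pattern.toList

-- ===== PRECONDITION & SPEC =====
def Spec_match_endpoint_pattern_py (endpoint : String) (pattern : String) (out : Bool) : Prop := out = match_endpoint_pattern_py_alt endpoint pattern
instance (endpoint : String) (pattern : String) (out : Bool) : Decidable (Spec_match_endpoint_pattern_py endpoint pattern out) := by unfold Spec_match_endpoint_pattern_py; infer_instance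

-- ===== CLAIM (what is proved, stated in full; the proofs are below) =====
def Claim_equal_match_endpoint_pattern_py : Prop := ∀ (endpoint : String) (pattern : String), Dom_match_endpoint_pattern_py endpoint pattern → Spec_match_endpoint_pattern_py endpoint pattern (match_endpoint_pattern_py endpoint pattern)

-- ===== LEMMAS AND PROOFS =====

-- the '/'-segments of a char list, by direct recursion
def splitSlash (s : List Char) : List (List Char) :=
  s.takeWhile (fun c => !(c == '/')) ::
    (if _h : s.dropWhile (fun c => !(c == '/')) = [] then []
     else splitSlash (s.dropWhile (fun c => !(c == '/'))).tail)
termination_by s.length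
decreasing_by
  have h1 := List.length_dropWhile_le (fun c : Char => !(c == '/')) s
  have h2 : (s.dropWhile (fun c : Char => !(c == '/'))).length ≠ 0 := by
    simpa [List.length_eq_zero_iff] using _h
  simp only [List.length_tail]
  omega

lemma cons_headI_tail (l : List (List Char)) (h : l ≠ []) : l.headI :: l.tail = l := by
  cases l with
  | nil => exact absurd rfl h
  | cons a t => simp

lemma splitSlash_ne_nil (s : List Char) : splitSlash s ≠ [] := by
  rw [splitSlash.eq_def]; simp

-- A's core, after splitting: length check then the zip loop
def aCore (es ps : List (List Char)) : Bool :=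
  if es.length ≠ ps.length then false else matchGoA (es.zip ps)

lemma aCore_cons (a b : List Char) (es ps : List (List Char)) :
    aCore (a :: es) (b :: ps) =
      if (PySem.Chars.startswith b ['{'] && PySem.Chars.endswith b ['}']) || a == b then
        aCore es ps
      else false := by
  simp only [aCore, matchGoA, List.zip_cons_cons, List.length_cons]
  by_cases hw : (PySem.Chars.startswith b ['{'] && PySem.Chars.endswith b ['}']) = true <;>
    by_cases hab : a = b <;>
      simp [hw, hab]

lemma aCore_one_cons (a b : List Char) (ps : List (List Char)) (h : ps ≠ []) :
    aCore [a] (b :: ps) = false := by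
  rw [aCore_cons]
  have hx : aCore [] ps = false := by
    cases ps with
    | nil => exact absurd rfl h
    | cons x t => simp [aCore]
  simp [hx]

lemma aCore_cons_one (a b : List Char) (es : List (List Char)) (h : es ≠ []) :
    aCore (a :: es) [b] = false := by
  rw [aCore_cons]
  have hx : aCore es [] = false := by
    cases es with
    | nil => exact absurd rfl h
    | cons x t => simp [aCore]
  simp [hx]

lemma singleton_prefix_iff (a : Char) (l : List Char) : [a] <+: l ↔ l.head? = some a := by
  cases l with
  | nil => simp
  | cons c t =>
    constructor
    · rintro ⟨u, hu⟩; simp at hu; simp [hu.1]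
    · intro h; simp at h; exact ⟨t, by simp [h]⟩

lemma singleton_infix_iff (a : Char) (l : List Char) : [a] <:+: l ↔ a ∈ l := by
  constructor
  · intro h; exact (List.singleton_sublist).mp h.sublist
  · intro h
    obtain ⟨s, t, hst⟩ := List.append_of_mem h
    exact ⟨s, t, by simp [hst]⟩

-- no '/' in e: takeWhile is everything, dropWhile nothing
lemma noSlash_tw_dw (e : List Char) (h : PySem.Chars.find e ['/'] < 0) :
    e.takeWhile (fun c => !(c == '/')) = e ∧ e.dropWhile (fun c => !(c == '/')) = [] := by
  have hne : PySem.Chars.find e ['/'] = -1 := by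
    have := PySem.Chars.neg_one_le_find e ['/']; omega
  have hnin : ('/' : Char) ∉ e := by
    intro hmem
    exact (PySem.Chars.find_eq_neg_one_iff e ['/']).mp hne ((singleton_infix_iff _ _).mpr hmem)
  constructor
  · rw [List.takeWhile_eq_self_iff]
    intro c hc; simp; intro hcc; exact hnin (hcc ▸ hc)
  · rw [List.dropWhile_eq_nil_iff]
    intro c hc; simp; intro hcc; exact hnin (hcc ▸ hc)

lemma splitSlash_noSlash (e : List Char) (h : PySem.Chars.find e ['/'] < 0) :
    splitSlash e = [e] := by
  obtain ⟨h1, h2⟩ := noSlash_tw_dw e h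
  rw [splitSlash.eq_def, dif_pos h2, h1]

-- take/drop at position k coincide with takeWhile/dropWhile when l[k] = '/' and nothing before is
lemma tw_dw_eq_take_drop (l : List Char) (k : Nat) (hk : l[k]? = some '/')
    (hlt : ∀ i, i < k → l[i]? ≠ some '/') :
    l.takeWhile (fun c => !(c == '/')) = l.take k ∧
      l.dropWhile (fun c => !(c == '/')) = l.drop k := by
  induction l generalizing k with
  | nil => simp at hk
  | cons c t ih =>
    cases k with
    | zero =>
      simp at hk
      subst hk
      simp
    | succ k' =>
      have hc : c ≠ '/' := by
        have := hlt 0 (Nat.succ_pos _)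
        simpa using this
      have hk' : t[k']? = some '/' := by simpa using hk
      have hlt' : ∀ i, i < k' → t[i]? ≠ some '/' := by
        intro i hi
        have := hlt (i + 1) (by omega)
        simpa using this
      obtain ⟨h1, h2⟩ := ih k' hk' hlt'
      constructor
      · simp [hc, h1]
      · simp [hc, h2]

-- positive find: segment facts
lemma posSlash_facts (e : List Char) (h : 0 ≤ PySem.Chars.find e ['/']) :
    (PySem.Chars.find e ['/']).toNat < e.length ∧
      e.takeWhile (fun c => !(c == '/')) = e.take (PySem.Chars.find e ['/']).toNat ∧
      e.dropWhile (fun c => !(c == '/')) = e.drop (PySem.Chars.find e ['/']).toNat ∧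
      e[(PySem.Chars.find e ['/']).toNat]? = some '/' := by
  obtain ⟨hpre, hmin⟩ := PySem.Chars.find_spec (s := e) (sub := ['/']) h
  set k := (PySem.Chars.find e ['/']).toNat with hkdef
  have hget : e[k]? = some '/' := by
    have := (singleton_prefix_iff '/' (e.drop k)).mp hpre
    simpa [List.head?_drop] using this
  have hklen : k < e.length := by
    by_contra hge
    rw [List.getElem?_eq_none (by omega)] at hget
    exact absurd hget (by simp)
  have hlt : ∀ i, i < k → e[i]? ≠ some '/' := by
    intro i hi hcontra
    apply hmin i hi
    rw [singleton_prefix_iff, List.head?_drop]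
    exact hcontra
  obtain ⟨h1, h2⟩ := tw_dw_eq_take_drop e k hget hlt
  exact ⟨hklen, h1, h2, hget⟩

lemma splitSlash_posSlash (e : List Char) (h : 0 ≤ PySem.Chars.find e ['/']) :
    splitSlash e =
      e.take (PySem.Chars.find e ['/']).toNat ::
        splitSlash (e.drop ((PySem.Chars.find e ['/']).toNat + 1)) := by
  obtain ⟨hklen, h1, h2, hget⟩ := posSlash_facts e h
  set k := (PySem.Chars.find e ['/']).toNat
  have hdrop : e.drop k = '/' :: e.drop (k + 1) := by
    have := List.getElem_cons_drop (as := e) (i := k) hklen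
    rw [List.getElem?_eq_getElem hklen] at hget
    simp at hget
    rw [← this, hget]
  rw [splitSlash.eq_def, h1, h2, hdrop]
  simp

-- splitOn with separator ['/'] is splitSlash
lemma splitSlash_cons_slash (rest : List Char) :
    splitSlash ('/' :: rest) = [] :: splitSlash rest := by
  rw [splitSlash.eq_def ('/' :: rest)]
  have hd : List.dropWhile (fun c => !(c == '/')) ('/' :: rest) = '/' :: rest := by
    simp
  rw [hd]
  simp

lemma splitSlash_cons_other (c : Char) (rest : List Char) (hc : c ≠ '/') :
    splitSlash (c :: rest) =
      (c :: (splitSlash rest).headI) :: (splitSlash rest).tail := by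
  have hd : List.dropWhile (fun x => !(x == '/')) (c :: rest) =
      List.dropWhile (fun x => !(x == '/')) rest := by
    simp [hc]
  have ht : List.takeWhile (fun x => !(x == '/')) (c :: rest) =
      c :: List.takeWhile (fun x => !(x == '/')) rest := by
    simp [hc]
  rw [splitSlash.eq_def (c :: rest), splitSlash.eq_def rest, hd, ht]
  by_cases hnil : List.dropWhile (fun x => !(x == '/')) rest = []
  · simp [hnil]
  · simp [hnil]

lemma go_spec : ∀ (fuel : Nat) (l cur : List Char) (hacc : List (List Char)),
    l.length < fuel →
    PySem.Chars.splitOn.go ['/'] fuel l cur hacc =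
      hacc.reverse ++ (cur.reverse ++ (splitSlash l).headI) :: (splitSlash l).tail := by
  intro fuel
  induction fuel with
  | zero => intro l cur hacc h; omega
  | succ f ih =>
    intro l cur hacc h
    cases l with
    | nil =>
      rw [PySem.Chars.splitOn.go]
      rw [splitSlash.eq_def]
      simp
      omega
    | cons c rest =>
      rw [PySem.Chars.splitOn.go]
      by_cases hc : c = '/'
      · subst hc
        have hpre : ['/'].isPrefixOf ('/' :: rest) = true := by simp [List.isPrefixOf]
        rw [if_pos hpre]
        have hd : List.drop ['/'].length ('/' :: rest) = rest := by simp
        rw [hd]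
        have hrec := ih rest [] (cur.reverse :: hacc) (by simp at h ⊢; omega)
        rw [hrec]
        rw [splitSlash_cons_slash]
        have hne := splitSlash_ne_nil rest
        simp
        rw [cons_headI_tail (splitSlash rest) hne]
      · have hpre : ['/'].isPrefixOf (c :: rest) = false := by
          simp [List.isPrefixOf]; exact fun hcc => absurd hcc.symm hc
        rw [if_neg (by simp [hpre])]
        have hrec := ih rest (c :: cur) hacc (by simp at h ⊢; omega)
        rw [hrec]
        rw [splitSlash_cons_other c rest hc]
        simp

lemma splitOn_eq_splitSlash (s : List Char) :
    PySem.Chars.splitOn s ['/'] = splitSlash s := by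
  unfold PySem.Chars.splitOn
  rw [go_spec (s.length + 1) s [] [] (by omega)]
  simp
  exact cons_headI_tail (splitSlash s) (splitSlash_ne_nil s)

-- altGo, one unfolding per shape of the two finds
lemma altGo_nn (e p : List Char) (hei : PySem.Chars.find e ['/'] < 0)
    (hpi : PySem.Chars.find p ['/'] < 0) :
    altGo e p = ((PySem.Chars.startswith p ['{'] && PySem.Chars.endswith p ['}']) || e == p) := by
  rw [altGo]
  simp only [hei, hpi, and_self, if_true]
  by_cases hw : (PySem.Chars.startswith p ['{'] && PySem.Chars.endswith p ['}']) = true <;>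
    by_cases hep : e = p <;> simp [hw, hep]

lemma altGo_mixed (e p : List Char)
    (h : ¬ (PySem.Chars.find e ['/'] < 0 ↔ PySem.Chars.find p ['/'] < 0)) :
    altGo e p = false := by
  rw [altGo]
  by_cases hei : PySem.Chars.find e ['/'] < 0 <;>
    by_cases hpi : PySem.Chars.find p ['/'] < 0 <;>
      simp [hei, hpi] at h ⊢

lemma altGo_pp (e p : List Char) (hei : 0 ≤ PySem.Chars.find e ['/'])
    (hpi : 0 ≤ PySem.Chars.find p ['/']) :
    altGo e p =
      (if (PySem.Chars.startswith (p.take (PySem.Chars.find p ['/']).toNat) ['{'] &&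
            PySem.Chars.endswith (p.take (PySem.Chars.find p ['/']).toNat) ['}']) ||
          e.take (PySem.Chars.find e ['/']).toNat == p.take (PySem.Chars.find p ['/']).toNat then
        altGo (e.drop ((PySem.Chars.find e ['/']).toNat + 1))
          (p.drop ((PySem.Chars.find p ['/']).toNat + 1))
      else false) := by
  have hsl_e : PySem.List.slice e none (some (PySem.Chars.find e ['/'])) =
      e.take (PySem.Chars.find e ['/']).toNat := PySem.List.slice_to e hei
  have hsl_p : PySem.List.slice p none (some (PySem.Chars.find p ['/'])) =
      p.take (PySem.Chars.find p ['/']).toNat := PySem.List.slice_to p hpi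
  have hsl_e' : PySem.List.slice e (some (PySem.Chars.find e ['/'] + 1)) none =
      e.drop ((PySem.Chars.find e ['/']).toNat + 1) := by
    rw [PySem.List.slice_from e (by omega : (0:Int) ≤ PySem.Chars.find e ['/'] + 1)]
    congr 1
    omega
  have hsl_p' : PySem.List.slice p (some (PySem.Chars.find p ['/'] + 1)) none =
      p.drop ((PySem.Chars.find p ['/']).toNat + 1) := by
    rw [PySem.List.slice_from p (by omega : (0:Int) ≤ PySem.Chars.find p ['/'] + 1)]
    congr 1
    omega
  have hei' : ¬ PySem.Chars.find e ['/'] < 0 := by omega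
  have hpi' : ¬ PySem.Chars.find p ['/'] < 0 := by omega
  rw [altGo]
  simp only [if_neg hei', if_neg hpi', hsl_e, hsl_p, hsl_e', hsl_p']
  by_cases hw : (PySem.Chars.startswith (p.take (PySem.Chars.find p ['/']).toNat) ['{'] &&
      PySem.Chars.endswith (p.take (PySem.Chars.find p ['/']).toNat) ['}']) = true <;>
    by_cases hep : e.take (PySem.Chars.find e ['/']).toNat = p.take (PySem.Chars.find p ['/']).toNat <;>
      simp [hw, hep, hei', hpi']

-- the main bridge: A's core on the segment lists equals B's recursion
lemma aCore_eq_altGo : ∀ (n : Nat) (e p : List Char), e.length ≤ n →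
    aCore (splitSlash e) (splitSlash p) = altGo e p := by
  intro n
  induction n with
  | zero =>
    intro e p he
    have he0 : e = [] := by
      cases e with
      | nil => rfl
      | cons a t => simp at he
    subst he0
    have hei : PySem.Chars.find ([] : List Char) ['/'] < 0 := by decide
    by_cases hpi : PySem.Chars.find p ['/'] < 0
    · rw [splitSlash_noSlash _ hei, splitSlash_noSlash _ hpi, altGo_nn _ _ hei hpi, aCore_cons]
      by_cases hw : (PySem.Chars.startswith p ['{'] && PySem.Chars.endswith p ['}']) = true <;>
        simp [hw, aCore, matchGoA, Bool.beq_eq_decide_eq]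
    · rw [splitSlash_noSlash _ hei, splitSlash_posSlash p (by omega),
        altGo_mixed _ _ (by simp [hei, hpi]),
        aCore_one_cons _ _ _ (splitSlash_ne_nil _)]
  | succ m ih =>
    intro e p he
    by_cases hei : PySem.Chars.find e ['/'] < 0
    · by_cases hpi : PySem.Chars.find p ['/'] < 0
      · rw [splitSlash_noSlash _ hei, splitSlash_noSlash _ hpi, altGo_nn _ _ hei hpi, aCore_cons]
        by_cases hw : (PySem.Chars.startswith p ['{'] && PySem.Chars.endswith p ['}']) = true <;>
          simp [hw, aCore, matchGoA, Bool.beq_eq_decide_eq]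
      · rw [splitSlash_noSlash _ hei, splitSlash_posSlash p (by omega),
          altGo_mixed _ _ (by simp [hei, hpi]),
          aCore_one_cons _ _ _ (splitSlash_ne_nil _)]
    · by_cases hpi : PySem.Chars.find p ['/'] < 0
      · rw [splitSlash_posSlash e (by omega), splitSlash_noSlash _ hpi,
          altGo_mixed _ _ (by simp [hei, hpi]),
          aCore_cons_one _ _ _ (splitSlash_ne_nil _)]
      · have hei' : 0 ≤ PySem.Chars.find e ['/'] := by omega
        have hpi' : 0 ≤ PySem.Chars.find p ['/'] := by omega
        rw [splitSlash_posSlash e hei', splitSlash_posSlash p hpi', aCore_cons,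
          altGo_pp _ _ hei' hpi']
        have heklen := (posSlash_facts e hei').1
        rw [ih (e.drop ((PySem.Chars.find e ['/']).toNat + 1))
          (p.drop ((PySem.Chars.find p ['/']).toNat + 1))
          (by simp only [List.length_drop]; omega)]

-- ===== VERDICT (by name: the statement is the Claim_ definition above) =====
theorem match_endpoint_pattern_py_spec : Claim_equal_match_endpoint_pattern_py := by
  intro endpoint pattern _
  unfold Spec_match_endpoint_pattern_py
  unfold match_endpoint_pattern_py match_endpoint_pattern_py_alt
  rw [splitOn_eq_splitSlash, splitOn_eq_splitSlash]
  have := aCore_eq_altGo endpoint.toList.length endpoint.toList pattern.toList le_rfl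
  rw [← this]
  simp [aCore]
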